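-- pv_equiv track=rewrite | github.com/ComradeAnon/NLP_Magistrature | DZ_1/src/pipeline.py | is_math_latex
-- ===== SOURCE A (Python) =====
-- def is_math_latex(latex_norm: str) -> bool:
--     """
--     Фильтр, чтобы не сохранять мусорные кропы.
--     Должно быть не пусто и содержать признаки математики.
--     """
--     if not latex_norm:
--         return False
--     s = latex_norm
--
--     # если contains typical math operators/symbols
--     math_markers = [
--         "=", r"\le", r"\ge", "<", ">", r"\neq", r"\approx",
--         r"\times", "+", "-", "^", "_",
--         r"\frac", r"\sqrt", r"\sum", r"\int",
--         "(", ")", "[", "]",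
--     ]
--     if any(m in s for m in math_markers):
--         return True
--
--     # или хотя бы цифры (иногда короткие)
--     if any(ch.isdigit() for ch in s):
--         return True
--
--     return False
-- ===== SOURCE B (Python) =====
-- _CMDS = ("le", "ge", "neq", "approx", "times", "frac", "sqrt", "sum", "int")
-- _SINGLES = frozenset("=<>+-^_()[]")
--
-- def is_math_latex(latex_norm: str) -> bool:
--     # Single left-to-right pass: at each position, a single-char marker or a
--     # digit hits immediately; a backslash hits iff one of the command names
--     # starts right after it.
--     s = latex_norm
--     for i, ch in enumerate(s):
--         if ch in _SINGLES or ch.isdigit():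
--             return True
--         if ch == "\\" and s.startswith(_CMDS, i + 1):
--             return True
--     return False
-- ===== Notes on version B (the rewrite author's own statement) =====
-- stated objective: alternative
-- what changed: Replaced A's twenty independent substring scans plus a separate digit scan by one left-to-right pass that classifies each character (single-char marker, digit, or backslash followed by one of the nine command names).
import Mathlib
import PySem

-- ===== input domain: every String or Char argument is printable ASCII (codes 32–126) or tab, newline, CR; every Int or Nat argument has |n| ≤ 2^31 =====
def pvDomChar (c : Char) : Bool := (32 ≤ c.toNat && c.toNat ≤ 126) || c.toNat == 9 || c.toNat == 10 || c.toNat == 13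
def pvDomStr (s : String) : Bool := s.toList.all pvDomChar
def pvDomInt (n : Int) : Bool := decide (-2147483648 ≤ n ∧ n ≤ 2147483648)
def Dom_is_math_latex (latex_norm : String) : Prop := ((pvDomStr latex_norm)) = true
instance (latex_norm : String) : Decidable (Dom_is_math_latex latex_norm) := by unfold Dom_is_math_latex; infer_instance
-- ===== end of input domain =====

-- B replaces A's twenty independent substring scans plus a separate digit scan
-- by one left-to-right pass over the characters (objective: alternative).


-- ===== PORT A =====
def pvMathMarkers : List String :=
  ["=", "\\le", "\\ge", "<", ">", "\\neq", "\\approx",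
   "\\times", "+", "-", "^", "_",
   "\\frac", "\\sqrt", "\\sum", "\\int",
   "(", ")", "[", "]"]

def is_math_latex (latex_norm : String) : Bool :=
  if latex_norm.toList = [] then false
  else
    let s := latex_norm
    if pvMathMarkers.any (fun m => PySem.Str.isIn m s) then true
    else if s.toList.any (fun ch => PySem.Chars.isdigit ch) then true
    else false

-- ===== PORT B =====
def pvCmds : List (List Char) :=
  [['l', 'e'], ['g', 'e'], ['n', 'e', 'q'], ['a', 'p', 'p', 'r', 'o', 'x'], ['t', 'i', 'm', 'e', 's'], ['f', 'r', 'a', 'c'], ['s', 'q', 'r', 't'], ['s', 'u', 'm'], ['i', 'n', 't']]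

def pvSingles : List Char := ['=', '<', '>', '+', '-', '^', '_', '(', ')', '[', ']']

def pvAltGo : List Char → Bool
  | [] => false
  | c :: rest =>
    if c ∈ pvSingles || PySem.Chars.isdigit c then true
    else if c == '\\' && pvCmds.any (fun cmd => PySem.Chars.startswith rest cmd) then true
    else pvAltGo rest

def is_math_latex_alt (latex_norm : String) : Bool :=
  pvAltGo latex_norm.toList

-- ===== PRECONDITION & SPEC =====
def Spec_is_math_latex (latex_norm : String) (out : Bool) : Prop := out = is_math_latex_alt latex_norm
instance (latex_norm : String) (out : Bool) : Decidable (Spec_is_math_latex latex_norm out) := by unfold Spec_is_math_latex; infer_instance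

-- ===== CLAIM (what is proved, stated in full; the proofs are below) =====
def Claim_equal_is_math_latex : Prop := ∀ (latex_norm : String), Dom_is_math_latex latex_norm → Spec_is_math_latex latex_norm (is_math_latex latex_norm)

-- ===== LEMMAS AND PROOFS =====

-- the markers as character lists
def pvMarkersL : List (List Char) :=
  [['='],
   ['\\', 'l', 'e'],
   ['\\', 'g', 'e'],
   ['<'],
   ['>'],
   ['\\', 'n', 'e', 'q'],
   ['\\', 'a', 'p', 'p', 'r', 'o', 'x'],
   ['\\', 't', 'i', 'm', 'e', 's'],
   ['+'],
   ['-'],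
   ['^'],
   ['_'],
   ['\\', 'f', 'r', 'a', 'c'],
   ['\\', 's', 'q', 'r', 't'],
   ['\\', 's', 'u', 'm'],
   ['\\', 'i', 'n', 't'],
   ['('],
   [')'],
   ['['],
   [']']]

lemma pvMarkersL_eq : pvMathMarkers.map String.toList = pvMarkersL := by rfl

-- A's condition, at the Prop level
def pvACond (l : List Char) : Prop :=
  (∃ m ∈ pvMarkersL, m <:+: l) ∨ (∃ c ∈ l, PySem.Chars.isdigit c = true)

-- decomposition of "some marker is a prefix of c :: rest"
lemma pv_marker_prefix_iff (c : Char) (rest : List Char) :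
    (∃ m ∈ pvMarkersL, m <+: c :: rest) ↔
      (c ∈ pvSingles ∨ (c = '\\' ∧ ∃ cmd ∈ pvCmds, cmd <+: rest)) := by
  simp only [pvMarkersL, pvSingles, pvCmds, List.mem_cons, List.not_mem_nil, or_false]
  constructor
  · rintro ⟨m, hm, hp⟩
    rcases hm with h|h|h|h|h|h|h|h|h|h|h|h|h|h|h|h|h|h|h|h
    all_goals subst h
    all_goals simp_all [List.cons_prefix_cons]
    all_goals tauto
  · rintro (hc | ⟨hc, cmd, hcmd, hp⟩)
    · rcases hc with h|h|h|h|h|h|h|h|h|h|h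
      · exact ⟨['='], by tauto, by simp_all [List.cons_prefix_cons]⟩
      · exact ⟨['<'], by tauto, by simp_all [List.cons_prefix_cons]⟩
      · exact ⟨['>'], by tauto, by simp_all [List.cons_prefix_cons]⟩
      · exact ⟨['+'], by tauto, by simp_all [List.cons_prefix_cons]⟩
      · exact ⟨['-'], by tauto, by simp_all [List.cons_prefix_cons]⟩
      · exact ⟨['^'], by tauto, by simp_all [List.cons_prefix_cons]⟩
      · exact ⟨['_'], by tauto, by simp_all [List.cons_prefix_cons]⟩
      · exact ⟨['('], by tauto, by simp_all [List.cons_prefix_cons]⟩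
      · exact ⟨[')'], by tauto, by simp_all [List.cons_prefix_cons]⟩
      · exact ⟨['['], by tauto, by simp_all [List.cons_prefix_cons]⟩
      · exact ⟨[']'], by tauto, by simp_all [List.cons_prefix_cons]⟩
    · subst hc
      rcases hcmd with h|h|h|h|h|h|h|h|h
      · exact ⟨['\\', 'l', 'e'], by tauto, by simp_all [List.cons_prefix_cons]⟩
      · exact ⟨['\\', 'g', 'e'], by tauto, by simp_all [List.cons_prefix_cons]⟩
      · exact ⟨['\\', 'n', 'e', 'q'], by tauto, by simp_all [List.cons_prefix_cons]⟩
      · exact ⟨['\\', 'a', 'p', 'p', 'r', 'o', 'x'], by tauto, by simp_all [List.cons_prefix_cons]⟩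
      · exact ⟨['\\', 't', 'i', 'm', 'e', 's'], by tauto, by simp_all [List.cons_prefix_cons]⟩
      · exact ⟨['\\', 'f', 'r', 'a', 'c'], by tauto, by simp_all [List.cons_prefix_cons]⟩
      · exact ⟨['\\', 's', 'q', 'r', 't'], by tauto, by simp_all [List.cons_prefix_cons]⟩
      · exact ⟨['\\', 's', 'u', 'm'], by tauto, by simp_all [List.cons_prefix_cons]⟩
      · exact ⟨['\\', 'i', 'n', 't'], by tauto, by simp_all [List.cons_prefix_cons]⟩

-- B's one-pass scan decides exactly A's condition
lemma pv_altGo_iff (l : List Char) : pvAltGo l = true ↔ pvACond l := by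
  induction l with
  | nil => simp [pvAltGo, pvACond]; decide
  | cons c rest ih =>
    rw [pvAltGo]
    constructor
    · intro h
      split_ifs at h with h1 h2
      · rcases Bool.or_eq_true_iff.mp h1 with hs | hd
        · left
          obtain ⟨m, hm, hp⟩ := (pv_marker_prefix_iff c rest).mpr (Or.inl (of_decide_eq_true hs))
          exact ⟨m, hm, hp.isInfix⟩
        · right; exact ⟨c, List.mem_cons_self, hd⟩
      · simp only [Bool.and_eq_true, beq_iff_eq, List.any_eq_true] at h2
        obtain ⟨hc, cmd, hcmd, hp⟩ := h2
        obtain ⟨m, hm, hpre⟩ := (pv_marker_prefix_iff c rest).mpr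
          (Or.inr ⟨hc, cmd, hcmd, (PySem.Chars.startswith_iff rest cmd).mp hp⟩)
        exact Or.inl ⟨m, hm, hpre.isInfix⟩
      · rcases (ih.mp h) with ⟨m, hm, hinf⟩ | ⟨d, hd, hdig⟩
        · exact Or.inl ⟨m, hm, hinf.trans (List.suffix_cons c rest).isInfix⟩
        · exact Or.inr ⟨d, List.mem_cons_of_mem _ hd, hdig⟩
    · intro h
      split_ifs with h1 h2
      · rfl
      · rfl
      · apply ih.mpr
        rcases h with ⟨m, hm, hinf⟩ | ⟨d, hd, hdig⟩
        · rcases List.infix_cons_iff.mp hinf with hpre | hinf'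
          · exfalso
            rcases (pv_marker_prefix_iff c rest).mp ⟨m, hm, hpre⟩ with hs | ⟨hc, cmd, hcmd, hp⟩
            · exact h1 (Bool.or_eq_true_iff.mpr (Or.inl (decide_eq_true hs)))
            · apply h2
              simp only [Bool.and_eq_true, beq_iff_eq, List.any_eq_true]
              exact ⟨hc, cmd, hcmd, (PySem.Chars.startswith_iff rest cmd).mpr hp⟩
          · exact Or.inl ⟨m, hm, hinf'⟩
        · rcases List.mem_cons.mp hd with rfl | hd'
          · exact absurd (Bool.or_eq_true_iff.mpr (Or.inr hdig)) h1
          · exact Or.inr ⟨d, hd', hdig⟩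

-- A's tests decide exactly A's condition
lemma pv_a_iff (s : String) :
    ((pvMathMarkers.any (fun m => PySem.Str.isIn m s) ||
      s.toList.any (fun ch => PySem.Chars.isdigit ch)) = true) ↔ pvACond s.toList := by
  simp only [Bool.or_eq_true, List.any_eq_true, pvACond, ← pvMarkersL_eq, List.mem_map,
    PySem.Str.isIn_eq]
  constructor
  · rintro (⟨m, hm, hin⟩ | ⟨c, hc, hd⟩)
    · exact Or.inl ⟨m.toList, ⟨m, hm, rfl⟩, (PySem.Chars.isIn_iff_infix m.toList s.toList).mp hin⟩
    · exact Or.inr ⟨c, hc, hd⟩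
  · rintro (⟨ml, ⟨m, hm, rfl⟩, hinf⟩ | ⟨c, hc, hd⟩)
    · exact Or.inl ⟨m, hm, (PySem.Chars.isIn_iff_infix m.toList s.toList).mpr hinf⟩
    · exact Or.inr ⟨c, hc, hd⟩

-- ===== VERDICT (by name: the statement is the Claim_ definition above) =====
theorem is_math_latex_spec : Claim_equal_is_math_latex := by
  intro s _
  unfold Spec_is_math_latex is_math_latex is_math_latex_alt
  by_cases hnil : s.toList = []
  · simp [hnil, pvAltGo]
  · have key : ((pvMathMarkers.any fun m => PySem.Str.isIn m s) ||
        (s.toList.any fun ch => PySem.Chars.isdigit ch)) = pvAltGo s.toList := by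
      rw [Bool.eq_iff_iff]
      exact (pv_a_iff s).trans (pv_altGo_iff s.toList).symm
    simp only [hnil, if_false]
    rw [← key]
    cases hM : (pvMathMarkers.any fun m => PySem.Str.isIn m s) <;>
      cases hD : (s.toList.any fun ch => PySem.Chars.isdigit ch) <;> simp
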